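-- pv_equiv track=rewrite | github.com/jimbo-t-fc/FC_AoC_2023 | JT/aoc_day_3.py | complete_number
-- ===== SOURCE A (Python) =====
-- def complete_number(coords, digit_locations):
--     complete_number = digit_locations[coords]
--     complete_num_coords = [coords]
--     x , y = coords
--     while True:
--         x += 1
--         if digit_locations.get((x,y), "False").isdigit():
--             complete_number = complete_number + digit_locations[(x,y)]
--             complete_num_coords.append((x,y))
--         else:
--             break
--     x , y = coords
--     while True:
--         x -= 1
--         if digit_locations.get((x,y), "False").isdigit():
--             complete_number = digit_locations[(x,y)] + complete_number
--             complete_num_coords = [(x,y)] + complete_num_coords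
--         else:
--             break
--     return [complete_number, complete_num_coords]
-- ===== SOURCE B (Python) =====
-- def complete_number(coords, digit_locations):
--     x0, y = coords
--     # index phase: sorted x-coordinates of all digit cells in row y
--     xs = sorted(x for (x, yy), v in digit_locations.items() if yy == y and v.isdigit())
--     # consecutive run to the right of x0 in the sorted list
--     right = []
--     prev = x0
--     for x in xs:
--         if x <= x0:
--             continue
--         if x != prev + 1:
--             break
--         right.append(x)
--         prev = x
--     # consecutive run to the left of x0, scanning the sorted list backwards
--     left = []
--     prev = x0
--     for x in reversed(xs):
--         if x >= x0:
--             continue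
--         if x != prev - 1:
--             break
--         left.append(x)
--         prev = x
--     left.reverse()
--     num_coords = [(x, y) for x in left] + [coords] + [(x, y) for x in right]
--     number = "".join(digit_locations[c] for c in num_coords)
--     return [number, num_coords]
-- ===== Notes on version B (the rewrite author's own statement) =====
-- stated objective: alternative
-- what changed: A pointer-walks the grid cell by cell in both directions, probing the dict and growing the string by append/prepend; B never walks the grid: it builds a sorted index of all digit-cell x-coordinates in the row, extracts the maximal consecutive segment around x0 by two scans of that sorted list, and joins the values once at the end.
import Mathlib
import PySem

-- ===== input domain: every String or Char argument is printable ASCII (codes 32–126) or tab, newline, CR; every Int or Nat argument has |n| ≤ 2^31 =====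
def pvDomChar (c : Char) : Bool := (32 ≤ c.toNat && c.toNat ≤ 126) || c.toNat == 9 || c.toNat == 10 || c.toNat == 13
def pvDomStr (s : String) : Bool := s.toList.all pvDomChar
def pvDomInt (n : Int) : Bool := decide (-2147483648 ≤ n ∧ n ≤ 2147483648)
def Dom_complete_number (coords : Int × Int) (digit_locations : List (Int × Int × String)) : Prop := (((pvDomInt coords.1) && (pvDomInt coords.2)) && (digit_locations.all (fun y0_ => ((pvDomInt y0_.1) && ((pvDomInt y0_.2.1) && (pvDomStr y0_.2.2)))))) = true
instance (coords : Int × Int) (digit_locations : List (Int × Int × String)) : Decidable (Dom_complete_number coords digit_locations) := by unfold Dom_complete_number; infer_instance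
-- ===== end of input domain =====

-- B replaces A's cell-by-cell pointer walk in both directions by: build a sorted index of the
-- x-coordinates of the row's digit cells, extract the maximal consecutive segment around x0 by
-- two scans of that sorted list, join the values once (objective: alternative, same cost).

-- shared dict primitive: lookup on the association list (first match = Python dict lookup)
def dget? (d : List (Int × Int × String)) (x y : Int) : Option String :=
  match d with
  | [] => none
  | (a, b, s) :: t => if a = x ∧ b = y then some s else dget? t x y

-- `digit_locations.get((x, y), "False").isdigit()` — A's loop guard
def digOk (d : List (Int × Int × String)) (x y : Int) : Bool :=
  PySem.Str.strIsdigit ((dget? d x y).getD "False")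

-- termination measures (cited by A's ports' `decreasing_by`): entries of row y right / left of x
def mR (d : List (Int × Int × String)) (y x : Int) : Nat :=
  (d.filter (fun e => decide (e.2.1 = y ∧ x ≤ e.1))).length
def mL (d : List (Int × Int × String)) (y x : Int) : Nat :=
  (d.filter (fun e => decide (e.2.1 = y ∧ e.1 ≤ x))).length

theorem filter_len_le {α : Type} (l : List α) (p q : α → Bool)
    (h : ∀ a, q a = true → p a = true) : (l.filter q).length ≤ (l.filter p).length := by
  induction l with
  | nil => simp
  | cons a t ih =>
    simp only [List.filter]
    cases hq : q a with
    | true => simp [h a hq]; omega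
    | false => cases hp : p a <;> simp <;> omega

theorem filter_len_lt {α : Type} (l : List α) (p q : α → Bool)
    (h : ∀ a, q a = true → p a = true) (e : α) (he : e ∈ l) (hp : p e = true) (hq : q e = false) :
    (l.filter q).length < (l.filter p).length := by
  induction l with
  | nil => simp at he
  | cons a t ih =>
    simp only [List.filter]
    rcases List.mem_cons.mp he with rfl | hmem
    · rw [hq, hp]; have := filter_len_le t p q h; simp; omega
    · cases hqa : q a with
      | true => rw [h a hqa]; have := ih hmem; simp; omega
      | false =>
        have := ih hmem
        cases hpa : p a <;> simp <;> omega

theorem dget?_mem (d : List (Int × Int × String)) (x y : Int) (s : String)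
    (h : dget? d x y = some s) : (x, y, s) ∈ d := by
  induction d with
  | nil => simp [dget?] at h
  | cons e t ih =>
    obtain ⟨a, b, v⟩ := e
    by_cases hc : a = x ∧ b = y
    · simp [dget?, hc] at h; simp [hc.1, hc.2, ← h]
    · simp only [dget?, if_neg hc] at h; exact List.mem_cons_of_mem _ (ih h)

theorem digOk_mem (d : List (Int × Int × String)) (x y : Int)
    (h : digOk d x y = true) : ∃ s, (x, y, s) ∈ d := by
  unfold digOk at h
  cases hg : dget? d x y with
  | none => rw [hg] at h; exact absurd h (by decide)
  | some s => exact ⟨s, dget?_mem d x y s hg⟩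

theorem mR_lt (d : List (Int × Int × String)) (y x : Int) (h : digOk d x y = true) :
    mR d y (x + 1) < mR d y x := by
  obtain ⟨s, hs⟩ := digOk_mem d x y h
  exact filter_len_lt d _ _ (fun a ha => by simp at ha ⊢; omega) (x, y, s) hs (by simp) (by simp)

theorem mL_lt (d : List (Int × Int × String)) (y x : Int) (h : digOk d x y = true) :
    mL d y (x - 1) < mL d y x := by
  obtain ⟨s, hs⟩ := digOk_mem d x y h
  exact filter_len_lt d _ _ (fun a ha => by simp at ha ⊢; omega) (x, y, s) hs (by simp) (by simp)

-- ===== PORT A =====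
-- first `while True` loop: x += 1 each turn, append value/coordinate on the right
def aRight (d : List (Int × Int × String)) (y : Int) (x : Int)
    (s : String) (cs : List (Int × Int)) : String × (List (Int × Int)) :=
  if h : digOk d x y = true then
    aRight d y (x + 1) (s ++ (dget? d x y).getD "") (cs ++ [(x, y)])
  else (s, cs)
termination_by mR d y x
decreasing_by exact mR_lt d y x h

-- second `while True` loop: x -= 1 each turn, prepend value/coordinate on the left
def aLeft (d : List (Int × Int × String)) (y : Int) (x : Int)
    (s : String) (cs : List (Int × Int)) : String × (List (Int × Int)) :=
  if h : digOk d x y = true then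
    aLeft d y (x - 1) ((dget? d x y).getD "" ++ s) ((x, y) :: cs)
  else (s, cs)
termination_by mL d y x
decreasing_by exact mL_lt d y x h

def complete_number (coords : Int × Int) (digit_locations : List (Int × Int × String)) :
    String × (List (Int × Int)) :=
  -- `digit_locations[coords]` raises KeyError when the key is absent (excluded by Pre_); none ↦ ""
  let s0 := (dget? digit_locations coords.1 coords.2).getD ""
  let r := aRight digit_locations coords.2 (coords.1 + 1) s0 [coords]
  aLeft digit_locations coords.2 (coords.1 - 1) r.1 r.2

-- ===== PORT B =====
-- the generator `x for (x, yy), v in digit_locations.items() if yy == y and v.isdigit()`: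
-- dict.items() yields each key once with its value (= first occurrence of the key in the
-- association-list model), so `seen` skips shadowed duplicates of a row-y key
def rowXs (d : List (Int × Int × String)) (y : Int) (seen : List Int) : List Int :=
  match d with
  | [] => []
  | (a, b, v) :: t =>
    if b = y ∧ ¬ seen.contains a then
      if PySem.Str.strIsdigit v then a :: rowXs t y (a :: seen) else rowXs t y (a :: seen)
    else rowXs t y seen

-- `for x in xs: if x <= x0: continue / if x != prev + 1: break / right.append(x); prev = x`
def ascRun (x0 : Int) : List Int → Int → List Int → List Int
  | [], _, acc => acc
  | x :: t, prev, acc =>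
    if x ≤ x0 then ascRun x0 t prev acc
    else if x ≠ prev + 1 then acc
    else ascRun x0 t x (acc ++ [x])

-- `for x in reversed(xs): if x >= x0: continue / if x != prev - 1: break / left.append(x); prev = x`
def descRun (x0 : Int) : List Int → Int → List Int → List Int
  | [], _, acc => acc
  | x :: t, prev, acc =>
    if x ≥ x0 then descRun x0 t prev acc
    else if x ≠ prev - 1 then acc
    else descRun x0 t x (acc ++ [x])

def complete_number_alt (coords : Int × Int) (digit_locations : List (Int × Int × String)) :
    String × (List (Int × Int)) :=
  let x0 := coords.1
  let y := coords.2
  let xs := PySem.List.sorted (rowXs digit_locations y []) (fun x => x) false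
  let right := ascRun x0 xs x0 []
  let left := (descRun x0 xs.reverse x0 []).reverse
  let num_coords := left.map (fun x => (x, y)) ++ [coords] ++ right.map (fun x => (x, y))
  -- `digit_locations[c]` raises KeyError only when coords itself is absent (excluded by Pre_); none ↦ ""
  let number := PySem.Str.join "" (num_coords.map (fun c => (dget? digit_locations c.1 c.2).getD ""))
  (number, num_coords)

-- ===== PRECONDITION & SPEC =====
-- Pre_ excludes exactly the inputs where `digit_locations[coords]` raises KeyError
-- (coords not a key of the dict); both Pythons raise there.
def Pre_complete_number (coords : Int × Int) (digit_locations : List (Int × Int × String)) : Prop :=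
  ∃ e ∈ digit_locations, e.1 = coords.1 ∧ e.2.1 = coords.2
instance (coords : Int × Int) (digit_locations : List (Int × Int × String)) : Decidable (Pre_complete_number coords digit_locations) := by unfold Pre_complete_number; infer_instance

def pvWitness_complete_number : (Int × Int) × (List (Int × Int × String)) :=
  ((2, 0), [(1, 0, "1"), (2, 0, "2"), (3, 0, "3"), (5, 0, "9")])

def Spec_complete_number (coords : Int × Int) (digit_locations : List (Int × Int × String)) (out : String × (List (Int × Int))) : Prop := out = complete_number_alt coords digit_locations
instance (coords : Int × Int) (digit_locations : List (Int × Int × String)) (out : String × (List (Int × Int))) : Decidable (Spec_complete_number coords digit_locations out) := by unfold Spec_complete_number; infer_instance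

-- ===== CLAIM (what is proved, stated in full; the proofs are below) =====
def Claim_equal_complete_number : Prop := ∀ (coords : Int × Int) (digit_locations : List (Int × Int × String)), Dom_complete_number coords digit_locations → Pre_complete_number coords digit_locations → Spec_complete_number coords digit_locations (complete_number coords digit_locations)

-- ===== LEMMAS AND PROOFS =====
theorem intercalate_nil_eq_flatten (l : List (List Char)) : [].intercalate l = l.flatten := by
  induction l with
  | nil => rfl
  | cons a t ih =>
    cases t with
    | nil => simp [List.intercalate]
    | cons b u => simp_all [List.intercalate, List.intersperse]

theorem strjoin_nil : PySem.Str.join "" ([] : List String) = "" := rfl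

theorem strjoin_cons (a : String) (l : List String) :
    PySem.Str.join "" (a :: l) = a ++ PySem.Str.join "" l := by
  apply String.toList_inj.mp
  simp [PySem.Str.toList_join, PySem.Chars.join, intercalate_nil_eq_flatten]

theorem strjoin_append (l1 l2 : List String) :
    PySem.Str.join "" (l1 ++ l2) = PySem.Str.join "" l1 ++ PySem.Str.join "" l2 := by
  apply String.toList_inj.mp
  simp [PySem.Str.toList_join, PySem.Chars.join, intercalate_nil_eq_flatten]

-- the maximal digit run starting at x going right (resp. ending at x going left), increasing
-- order, and its mirror going left in decreasing order
def rrun (d : List (Int × Int × String)) (y : Int) (x : Int) : List Int :=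
  if h : digOk d x y = true then x :: rrun d y (x + 1) else []
termination_by mR d y x
decreasing_by exact mR_lt d y x h

def lrun (d : List (Int × Int × String)) (y : Int) (x : Int) : List Int :=
  if h : digOk d x y = true then lrun d y (x - 1) ++ [x] else []
termination_by mL d y x
decreasing_by exact mL_lt d y x h

def drun (d : List (Int × Int × String)) (y : Int) (x : Int) : List Int :=
  if h : digOk d x y = true then x :: drun d y (x - 1) else []
termination_by mL d y x
decreasing_by exact mL_lt d y x h

def vals (d : List (Int × Int × String)) (y : Int) (l : List Int) : List String :=
  l.map (fun t => (dget? d t y).getD "")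

theorem lrun_eq_drun_reverse (d : List (Int × Int × String)) (y x : Int) :
    lrun d y x = (drun d y x).reverse := by
  fun_induction drun d y x with
  | case1 x h ih => rw [lrun, dif_pos h, ih]; simp
  | case2 x h => rw [lrun, dif_neg h]; simp

theorem aRight_eq (d : List (Int × Int × String)) (y x : Int) (s : String) (cs : List (Int × Int)) :
    aRight d y x s cs =
      (s ++ PySem.Str.join "" (vals d y (rrun d y x)), cs ++ (rrun d y x).map (fun t => (t, y))) := by
  fun_induction aRight d y x s cs with
  | case1 x s cs h ih =>
    rw [rrun, dif_pos h, ih]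
    simp [vals, strjoin_cons, String.append_assoc]
  | case2 x s cs h =>
    rw [rrun, dif_neg h]
    simp [vals, strjoin_nil]

theorem aLeft_eq (d : List (Int × Int × String)) (y x : Int) (s : String) (cs : List (Int × Int)) :
    aLeft d y x s cs =
      (PySem.Str.join "" (vals d y (lrun d y x)) ++ s, (lrun d y x).map (fun t => (t, y)) ++ cs) := by
  fun_induction aLeft d y x s cs with
  | case1 x s cs h ih =>
    rw [lrun, dif_pos h, ih]
    simp [vals, strjoin_append, strjoin_cons, strjoin_nil, String.append_assoc]
  | case2 x s cs h =>
    rw [lrun, dif_neg h]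
    simp [vals, strjoin_nil]

-- membership of the row index: x is listed iff it is not shadowed by `seen` and its (first) value
-- in row y is a digit string
theorem mem_rowXs (d : List (Int × Int × String)) (y : Int) :
    ∀ (seen : List Int) (z : Int),
      z ∈ rowXs d y seen ↔ z ∉ seen ∧ digOk d z y = true := by
  induction d with
  | nil =>
    intro seen z
    have hf : digOk [] z y = false := by
      unfold digOk
      rw [show dget? [] z y = none from rfl]
      decide
    simp [rowXs, hf]
  | cons e t ih =>
    intro seen z
    obtain ⟨a, b, v⟩ := e
    have hunf : rowXs ((a, b, v) :: t) y seen =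
        if b = y ∧ ¬ seen.contains a = true then
          (if PySem.Str.strIsdigit v = true then a :: rowXs t y (a :: seen)
           else rowXs t y (a :: seen))
        else rowXs t y seen := rfl
    have hdig : digOk ((a, b, v) :: t) z y =
        (if a = z ∧ b = y then PySem.Str.strIsdigit v else digOk t z y) := by
      by_cases hc : a = z ∧ b = y <;> simp [digOk, dget?, hc]
    rw [hunf, hdig]
    by_cases hby : b = y
    · subst hby
      by_cases hsa : seen.contains a = true
      · have hamem : a ∈ seen := by simpa using hsa
        rw [if_neg (show ¬(b = b ∧ ¬ seen.contains a = true) from fun hh => hh.2 hsa),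
          ih seen z]
        by_cases haz : a = z
        · subst haz
          rw [if_pos (show a = a ∧ b = b from ⟨rfl, rfl⟩)]
          constructor
          · rintro ⟨hns, _⟩; exact absurd hamem hns
          · rintro ⟨hns, _⟩; exact absurd hamem hns
        · rw [if_neg (show ¬(a = z ∧ b = b) from fun hh => haz hh.1)]
      · have hana : a ∉ seen := fun hm => hsa (by simpa using hm)
        rw [if_pos (show b = b ∧ ¬ seen.contains a = true from ⟨rfl, hsa⟩)]
        by_cases haz : a = z
        · subst haz
          rw [if_pos (show a = a ∧ b = b from ⟨rfl, rfl⟩)]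
          cases hv : PySem.Str.strIsdigit v with
          | true => simp [ih, hana]
          | false => simp [ih]
        · have hzne : z ≠ a := fun h => haz h.symm
          cases hv : PySem.Str.strIsdigit v with
          | true => simp [ih, hzne, haz]
          | false => simp [ih, hzne, haz]
    · rw [if_neg (show ¬(b = y ∧ ¬ seen.contains a = true) from fun hh => hby hh.1),
        if_neg (show ¬(a = z ∧ b = y) from fun hh => hby hh.2), ih seen z]

theorem nodup_rowXs (d : List (Int × Int × String)) (y : Int) :
    ∀ seen : List Int, (rowXs d y seen).Nodup := by
  induction d with
  | nil => intro seen; simp [rowXs]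
  | cons e t ih =>
    intro seen
    obtain ⟨a, b, v⟩ := e
    have hunf : rowXs ((a, b, v) :: t) y seen =
        if b = y ∧ ¬ seen.contains a = true then
          (if PySem.Str.strIsdigit v = true then a :: rowXs t y (a :: seen)
           else rowXs t y (a :: seen))
        else rowXs t y seen := rfl
    rw [hunf]
    by_cases hc : b = y ∧ ¬ seen.contains a = true
    · rw [if_pos hc]
      cases hv : PySem.Str.strIsdigit v with
      | true =>
        rw [if_pos rfl]
        exact List.nodup_cons.mpr
          ⟨fun hm => ((mem_rowXs t y (a :: seen) a).mp hm).1 List.mem_cons_self, ih _⟩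
      | false =>
        rw [if_neg (by decide)]
        exact ih _
    · rw [if_neg hc]; exact ih seen

-- the ascending scan of a strictly increasing list whose membership (above prev) is exactly
-- digOk computes the maximal consecutive run to the right of prev
theorem ascRun_eq (d : List (Int × Int × String)) (y x0 : Int) :
    ∀ (T : List Int) (prev : Int) (acc : List Int), x0 ≤ prev →
      T.Pairwise (· < ·) →
      (∀ z ∈ T, z ≤ x0 ∨ prev < z) →
      (∀ z, prev < z → (z ∈ T ↔ digOk d z y = true)) →
      ascRun x0 T prev acc = acc ++ rrun d y (prev + 1) := by
  intro T
  induction T with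
  | nil =>
    intro prev acc _ _ _ hmem
    have : ¬ digOk d (prev + 1) y = true := by
      rw [← hmem (prev + 1) (by omega)]; simp
    rw [ascRun, rrun, dif_neg this]; simp
  | cons x t ih =>
    intro prev acc hle hp hdisj hmem
    have hpt := (List.pairwise_cons.mp hp).2
    have hxlt := (List.pairwise_cons.mp hp).1
    by_cases hx : x ≤ x0
    · rw [show ascRun x0 (x :: t) prev acc = ascRun x0 t prev acc from by
        simp [ascRun, hx]]
      refine ih prev acc hle hpt (fun z hz => hdisj z (List.mem_cons_of_mem _ hz))
        (fun z hz => ?_)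
      rw [← hmem z hz, List.mem_cons]
      constructor
      · exact fun h => Or.inr h
      · rintro (h | h)
        · exfalso; omega
        · exact h
    · have hpx : prev < x := by rcases hdisj x List.mem_cons_self with h | h <;> omega
      by_cases hxe : x = prev + 1
      · subst hxe
        rw [show ascRun x0 ((prev + 1) :: t) prev acc =
              ascRun x0 t (prev + 1) (acc ++ [prev + 1]) from by simp [ascRun, hx]]
        have hdg : digOk d (prev + 1) y = true :=
          (hmem (prev + 1) (by omega)).mp List.mem_cons_self
        rw [rrun, dif_pos hdg,
          ih (prev + 1) (acc ++ [prev + 1]) (by omega) hpt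
            (fun z hz => Or.inr (hxlt z hz))
            (fun z hz => by
              rw [← hmem z (by omega), List.mem_cons]
              constructor
              · exact fun h => Or.inr h
              · rintro (h | h)
                · exfalso; omega
                · exact h)]
        simp
      · have hnot : ¬ digOk d (prev + 1) y = true := by
          rw [← hmem (prev + 1) (by omega), List.mem_cons]
          rintro (h | h)
          · omega
          · have := hxlt _ h; omega
        rw [show ascRun x0 (x :: t) prev acc = acc from by simp [ascRun, hx, hxe],
          rrun, dif_neg hnot]; simp

-- mirror: the descending scan computes the maximal consecutive run to the left of prev
theorem descRun_eq (d : List (Int × Int × String)) (y x0 : Int) :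
    ∀ (T : List Int) (prev : Int) (acc : List Int), prev ≤ x0 →
      T.Pairwise (· > ·) →
      (∀ z ∈ T, x0 ≤ z ∨ z < prev) →
      (∀ z, z < prev → (z ∈ T ↔ digOk d z y = true)) →
      descRun x0 T prev acc = acc ++ drun d y (prev - 1) := by
  intro T
  induction T with
  | nil =>
    intro prev acc _ _ _ hmem
    have : ¬ digOk d (prev - 1) y = true := by
      rw [← hmem (prev - 1) (by omega)]; simp
    rw [descRun, drun, dif_neg this]; simp
  | cons x t ih =>
    intro prev acc hle hp hdisj hmem
    have hpt := (List.pairwise_cons.mp hp).2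
    have hxgt := (List.pairwise_cons.mp hp).1
    by_cases hx : x ≥ x0
    · rw [show descRun x0 (x :: t) prev acc = descRun x0 t prev acc from by
        simp [descRun, hx]]
      refine ih prev acc hle hpt (fun z hz => hdisj z (List.mem_cons_of_mem _ hz))
        (fun z hz => ?_)
      rw [← hmem z hz, List.mem_cons]
      constructor
      · exact fun h => Or.inr h
      · rintro (h | h)
        · exfalso; omega
        · exact h
    · have hpx : x < prev := by rcases hdisj x List.mem_cons_self with h | h <;> omega
      by_cases hxe : x = prev - 1
      · subst hxe
        rw [show descRun x0 ((prev - 1) :: t) prev acc =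
              descRun x0 t (prev - 1) (acc ++ [prev - 1]) from by simp [descRun, hx]]
        have hdg : digOk d (prev - 1) y = true :=
          (hmem (prev - 1) (by omega)).mp List.mem_cons_self
        rw [drun, dif_pos hdg,
          ih (prev - 1) (acc ++ [prev - 1]) (by omega) hpt
            (fun z hz => Or.inr (hxgt z hz))
            (fun z hz => by
              rw [← hmem z (by omega), List.mem_cons]
              constructor
              · exact fun h => Or.inr h
              · rintro (h | h)
                · exfalso; omega
                · exact h)]
        simp
      · have hnot : ¬ digOk d (prev - 1) y = true := by
          rw [← hmem (prev - 1) (by omega), List.mem_cons]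
          rintro (h | h)
          · omega
          · have := hxgt _ h; omega
        rw [show descRun x0 (x :: t) prev acc = acc from by simp [descRun, hx, hxe],
          drun, dif_neg hnot]; simp

theorem ports_agree (coords : Int × Int) (d : List (Int × Int × String)) :
    complete_number coords d = complete_number_alt coords d := by
  obtain ⟨x0, y⟩ := coords
  rw [complete_number, complete_number_alt]
  -- facts about B's sorted row index
  set xs := PySem.List.sorted (rowXs d y []) (fun x => x) false with hxs
  have hperm : xs.Perm (rowXs d y []) := PySem.List.sorted_perm _ _ _
  have hmemxs : ∀ z : Int, z ∈ xs ↔ digOk d z y = true := by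
    intro z
    rw [hperm.mem_iff, mem_rowXs]
    simp
  have hnd : xs.Nodup := hperm.nodup_iff.mpr (nodup_rowXs d y [])
  have hple : xs.Pairwise (· ≤ ·) := PySem.List.sorted_pairwise _ _
  have hplt : xs.Pairwise (· < ·) :=
    (hple.and hnd).imp (fun h => lt_of_le_of_ne h.1 h.2)
  have hR : ascRun x0 xs x0 [] = rrun d y (x0 + 1) := by
    rw [ascRun_eq d y x0 xs x0 [] le_rfl hplt (fun z _ => by omega)
      (fun z _ => hmemxs z)]
    simp
  have hL : descRun x0 xs.reverse x0 [] = drun d y (x0 - 1) := by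
    rw [descRun_eq d y x0 xs.reverse x0 [] le_rfl
      (List.pairwise_reverse.mpr hplt)
      (fun z _ => by omega)
      (fun z _ => by rw [List.mem_reverse]; exact hmemxs z)]
    simp
  simp only [hR, hL, ← lrun_eq_drun_reverse, aRight_eq, aLeft_eq]
  rw [show ((lrun d y (x0 - 1)).map (fun x => (x, y)) ++ [(x0, y)] ++
        (rrun d y (x0 + 1)).map (fun x => (x, y))).map
        (fun c => ((dget? d c.1 c.2).getD "" : String)) =
      vals d y (lrun d y (x0 - 1)) ++
        [(dget? d x0 y).getD ""] ++ vals d y (rrun d y (x0 + 1)) from by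
    simp [vals, List.map_map, Function.comp_def]]
  rw [strjoin_append, strjoin_append, strjoin_cons, strjoin_nil]
  simp [String.append_assoc]

-- ===== VERDICT (by name: the statement is the Claim_ definition above) =====
theorem complete_number_spec : Claim_equal_complete_number := by
  intro coords d _ _
  unfold Spec_complete_number
  exact ports_agree coords d
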